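-- pv_equiv track=rewrite | github.com/AlexFedorov228/Lab8 | lab_2_2.py | parse_level_3
-- ===== SOURCE A (Python) =====
-- from enum import Enum, auto
--
-- class State(Enum):
--     S0 = auto() # Початковий стан
--     S1 = auto() # Стан після '$' (очікуємо A-F, \d або \W)
--     S2 = auto() # Стан всередині послідовності [A-F]+
--     S3 = auto() # Фінальний стан (всередині \W+)
--     SF = auto() # Стан помилки (Fail)
--
-- class CharCategory(Enum):
--     DOLLAR = auto()
--     DIGIT = auto()
--     HEX_AF = auto()
--     NON_ALNUM = auto() # \W
--     OTHER = auto()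
--
-- def get_char_category(char: str) -> CharCategory:
--     """Визначає категорію символу для таблиці переходів."""
--     if char == '$':
--         return CharCategory.DOLLAR
--     if char.isdigit():
--         return CharCategory.DIGIT
--     if 'A' <= char <= 'F':
--         return CharCategory.HEX_AF
--     if not char.isalnum():
--         return CharCategory.NON_ALNUM
--     return CharCategory.OTHER # Все інше (a-z, G-Z і т.д.)
--
-- transition_table = {
--     State.S0: {
--         CharCategory.DOLLAR: State.S1,
--         # Все інше веде в SF (стан помилки)
--     },
--     State.S1: {
--         CharCategory.DIGIT: State.S1,
--         CharCategory.HEX_AF: State.S2,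
--         CharCategory.DOLLAR: State.S3, # $ - це \W
--         CharCategory.NON_ALNUM: State.S3,
--     },
--     State.S2: {
--         CharCategory.HEX_AF: State.S2,
--         CharCategory.DIGIT: State.S1,
--         CharCategory.DOLLAR: State.S3, # $ - це \W
--         CharCategory.NON_ALNUM: State.S3,
--     },
--     State.S3: {
--         CharCategory.DOLLAR: State.S3, # $ - це \W
--         CharCategory.NON_ALNUM: State.S3,
--     }
-- }
--
-- def parse_level_3(text: str) -> bool:
--     """
--     Описує синтаксичний аналізатор на основі скінченного автомата,
--     реалізованого через таблицю переходів. [cite: 19]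
--     """
--     current_state = State.S0
--
--     # Використовуємо цикл for, як вимагає завдання [cite: 19]
--     for char in text:
--         category = get_char_category(char)
--
--         # Шукаємо наступний стан у таблиці.
--         # .get(category, State.SF) означає:
--         # "спробуй взяти ключ 'category', а якщо його немає, поверни State.SF"
--         current_state = transition_table.get(current_state, {}).get(category, State.SF)
--
--         if current_state == State.SF:
--             break
--
--     # Слово правильне, тільки якщо ми у фінальному стані S3
--     return current_state == State.S3
-- ===== SOURCE B (Python) =====
-- def parse_level_3(text: str) -> bool:
--     # Phase 1: mandatory leading '$'
--     if not text or text[0] != '$':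
--         return False
--     # Phase 2: skip the middle [0-9A-F]* run
--     i = 1
--     n = len(text)
--     while i < n and (text[i].isdigit() or 'A' <= text[i] <= 'F'):
--         i += 1
--     # Phase 3: a non-empty suffix of non-alphanumeric characters
--     if i == n:
--         return False
--     return all(not ch.isalnum() for ch in text[i:])
-- ===== Notes on version B (the rewrite author's own statement) =====
-- stated objective: simpler
-- what changed: Replaced the Enum-state DFA with its nested transition-table dict lookups by a three-phase scan: check the mandatory dollar prefix, advance an index past the middle run of digits/hex letters, then require a non-empty suffix of non-alphanumeric characters.
import Mathlib
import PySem

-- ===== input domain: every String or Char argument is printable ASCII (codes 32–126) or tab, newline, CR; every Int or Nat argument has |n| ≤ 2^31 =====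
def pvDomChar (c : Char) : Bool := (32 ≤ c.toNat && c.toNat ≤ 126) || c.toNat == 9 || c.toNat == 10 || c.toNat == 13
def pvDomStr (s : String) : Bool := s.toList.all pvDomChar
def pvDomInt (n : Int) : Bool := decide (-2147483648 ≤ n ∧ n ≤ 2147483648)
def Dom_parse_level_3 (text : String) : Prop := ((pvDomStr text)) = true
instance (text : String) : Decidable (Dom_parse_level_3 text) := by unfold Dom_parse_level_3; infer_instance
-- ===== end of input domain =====

-- B replaces the Enum-state transition-table DFA by a simpler three-phase scan ('$', skip [0-9A-F]*, non-empty non-alnum suffix).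

-- ===== PORT A =====
inductive PVState | S0 | S1 | S2 | S3 | SF
deriving DecidableEq, Repr

inductive PVCat | dollar | digit | hexAF | nonAlnum | other
deriving DecidableEq, Repr

def get_char_category (c : Char) : PVCat :=
  if c = '$' then PVCat.dollar
  else if PySem.Chars.isdigit c then PVCat.digit
  else if 'A' ≤ c ∧ c ≤ 'F' then PVCat.hexAF
  else if ¬ (PySem.Chars.isalnum c = true) then PVCat.nonAlnum
  else PVCat.other

-- transition_table.get(st, {}).get(cat, SF), written out row by row
def pvTransition (st : PVState) (cat : PVCat) : PVState :=
  match st, cat with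
  | PVState.S0, PVCat.dollar   => PVState.S1
  | PVState.S1, PVCat.digit    => PVState.S1
  | PVState.S1, PVCat.hexAF    => PVState.S2
  | PVState.S1, PVCat.dollar   => PVState.S3
  | PVState.S1, PVCat.nonAlnum => PVState.S3
  | PVState.S2, PVCat.hexAF    => PVState.S2
  | PVState.S2, PVCat.digit    => PVState.S1
  | PVState.S2, PVCat.dollar   => PVState.S3
  | PVState.S2, PVCat.nonAlnum => PVState.S3
  | PVState.S3, PVCat.dollar   => PVState.S3
  | PVState.S3, PVCat.nonAlnum => PVState.S3
  | _, _ => PVState.SF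

-- the for-loop with its early break on SF
def pvLoopA : List Char → PVState → PVState
  | [], st => st
  | c :: rest, st =>
    let st' := pvTransition st (get_char_category c)
    if st' = PVState.SF then st' else pvLoopA rest st'

def parse_level_3 (text : String) : Bool :=
  decide (pvLoopA text.toList PVState.S0 = PVState.S3)

-- ===== PORT B =====
-- phase 2 of Source B: the while-loop advancing i past the [0-9A-F]* run, as the remaining suffix text[i:]
def pvSkipMid : List Char → List Char
  | [] => []
  | c :: rest =>
    if PySem.Chars.isdigit c || (decide ('A' ≤ c) && decide (c ≤ 'F')) then pvSkipMid rest
    else c :: rest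

def parse_level_3_alt (text : String) : Bool :=
  match text.toList with
  | [] => false
  | c :: rest =>
    if c ≠ '$' then false
    else
      match pvSkipMid rest with
      | [] => false
      | suffix => suffix.all (fun ch => ! PySem.Chars.isalnum ch)

-- ===== PRECONDITION & SPEC =====
def Spec_parse_level_3 (text : String) (out : Bool) : Prop := out = parse_level_3_alt text
instance (text : String) (out : Bool) : Decidable (Spec_parse_level_3 text out) := by unfold Spec_parse_level_3; infer_instance

-- ===== CLAIM (what is proved, stated in full; the proofs are below) =====
def Claim_equal_parse_level_3 : Prop := ∀ (text : String), Dom_parse_level_3 text → Spec_parse_level_3 text (parse_level_3 text)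

-- ===== LEMMAS AND PROOFS =====

-- '$' is not alphanumeric, digits and A–F are; category facts
lemma cat_of_not_alnum {c : Char} (h : PySem.Chars.isalnum c = false) :
    get_char_category c = PVCat.dollar ∨ get_char_category c = PVCat.nonAlnum := by
  unfold get_char_category
  by_cases hd : c = '$'
  · simp [hd]
  · have h1 : PySem.Chars.isdigit c = false := by
      revert h; unfold PySem.Chars.isalnum; cases PySem.Chars.isdigit c <;> simp
    have h2 : ¬ ('A' ≤ c ∧ c ≤ 'F') := by
      rintro ⟨ha, hb⟩
      have : PySem.Chars.isalnum c = true := by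
        unfold PySem.Chars.isalnum PySem.Chars.isalpha PySem.Chars.isupper
        have hz : c ≤ 'Z' := le_trans hb (by decide)
        simp [ha, hz]
      simp [this] at h
    simp [hd, h1, h2, h]

-- once in S3, the loop accepts iff every remaining char is non-alnum
lemma loopA_S3 (l : List Char) :
    decide (pvLoopA l PVState.S3 = PVState.S3) = l.all (fun ch => ! PySem.Chars.isalnum ch) := by
  induction l with
  | nil => simp [pvLoopA]
  | cons c rest ih =>
    by_cases h : PySem.Chars.isalnum c = true
    · have hcat : get_char_category c = PVCat.digit ∨ get_char_category c = PVCat.hexAF ∨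
          get_char_category c = PVCat.other := by
        unfold get_char_category
        have hd : c ≠ '$' := by rintro rfl; simp [PySem.Chars.isalnum, PySem.Chars.isalpha,
          PySem.Chars.isupper, PySem.Chars.islower, PySem.Chars.isdigit] at h
        by_cases h1 : PySem.Chars.isdigit c = true
        · simp [hd, h1]
        · by_cases h2 : 'A' ≤ c ∧ c ≤ 'F'
          · simp [hd, h1, h2]
          · simp [hd, h1, h2, h]
      rcases hcat with hc | hc | hc <;> simp [pvLoopA, hc, pvTransition, h]
    · have hf : PySem.Chars.isalnum c = false := by revert h; cases PySem.Chars.isalnum c <;> simp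
      rcases cat_of_not_alnum hf with hc | hc <;>
        simp [pvLoopA, hc, pvTransition, hf, ih]

-- from S1/S2 the loop agrees with B's phase-2 + phase-3
lemma loopA_mid (l : List Char) (st : PVState) (hst : st = PVState.S1 ∨ st = PVState.S2) :
    decide (pvLoopA l st = PVState.S3) =
      (match pvSkipMid l with
       | [] => false
       | suffix => suffix.all (fun ch => ! PySem.Chars.isalnum ch)) := by
  induction l generalizing st with
  | nil => rcases hst with rfl | rfl <;> simp [pvLoopA, pvSkipMid]
  | cons c rest ih =>
    by_cases h1 : PySem.Chars.isdigit c = true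
    · have hd : c ≠ '$' := by rintro rfl; simp [PySem.Chars.isdigit] at h1
      have hcat : get_char_category c = PVCat.digit := by
        unfold get_char_category; simp [hd, h1]
      have hskip : pvSkipMid (c :: rest) = pvSkipMid rest := by
        show (if PySem.Chars.isdigit c || (decide ('A' ≤ c) && decide (c ≤ 'F'))
              then pvSkipMid rest else c :: rest) = pvSkipMid rest
        simp [h1]
      rcases hst with rfl | rfl <;>
        simpa [pvLoopA, hcat, pvTransition, hskip] using ih PVState.S1 (Or.inl rfl)
    · by_cases h2 : 'A' ≤ c ∧ c ≤ 'F'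
      · have hd : c ≠ '$' := by rintro rfl; exact absurd h2.1 (by decide)
        have hcat : get_char_category c = PVCat.hexAF := by
          unfold get_char_category; simp [hd, h1, h2]
        have hskip : pvSkipMid (c :: rest) = pvSkipMid rest := by
          show (if PySem.Chars.isdigit c || (decide ('A' ≤ c) && decide (c ≤ 'F'))
                then pvSkipMid rest else c :: rest) = pvSkipMid rest
          simp [h2.1, h2.2]
        rcases hst with rfl | rfl <;>
          simpa [pvLoopA, hcat, pvTransition, hskip] using ih PVState.S2 (Or.inr rfl)
      · -- middle run ends at c
        have hskip : pvSkipMid (c :: rest) = c :: rest := by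
          show (if PySem.Chars.isdigit c || (decide ('A' ≤ c) && decide (c ≤ 'F'))
                then pvSkipMid rest else c :: rest) = c :: rest
          rcases Decidable.not_and_iff_not_or_not.mp h2 with h | h <;> simp [h1, h]
        by_cases h : PySem.Chars.isalnum c = true
        · -- c is alnum but neither digit nor A-F: OTHER, loop dies; B's all fails at c
          have hcat : get_char_category c = PVCat.other := by
            unfold get_char_category
            have hd : c ≠ '$' := by rintro rfl; simp [PySem.Chars.isalnum, PySem.Chars.isalpha,
              PySem.Chars.isupper, PySem.Chars.islower, PySem.Chars.isdigit] at h
            simp [hd, h1, h2, h]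
          rcases hst with rfl | rfl <;> simp [pvLoopA, hcat, pvTransition, hskip, h]
        · have hf : PySem.Chars.isalnum c = false := by revert h; cases PySem.Chars.isalnum c <;> simp
          rcases cat_of_not_alnum hf with hc | hc <;>
            rcases hst with rfl | rfl <;>
              simp [pvLoopA, hc, pvTransition, hskip, hf, loopA_S3]

-- ===== VERDICT (by name: the statement is the Claim_ definition above) =====
theorem parse_level_3_spec : Claim_equal_parse_level_3 := by
  intro text _
  unfold Spec_parse_level_3 parse_level_3 parse_level_3_alt
  cases hl : text.toList with
  | nil => simp [pvLoopA]
  | cons c rest =>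
    by_cases hd : c = '$'
    · subst hd
      have hcat : get_char_category '$' = PVCat.dollar := by decide
      simp only [pvLoopA, hcat, pvTransition]
      simpa using loopA_mid rest PVState.S1 (Or.inl rfl)
    · have hcat : get_char_category c ≠ PVCat.dollar := by
        unfold get_char_category
        by_cases h1 : PySem.Chars.isdigit c = true
        · simp [hd, h1]
        · by_cases h2 : 'A' ≤ c ∧ c ≤ 'F'
          · simp [hd, h1, h2]
          · by_cases h3 : PySem.Chars.isalnum c = true <;> simp [hd, h1, h2, h3]
      have hstep : pvTransition PVState.S0 (get_char_category c) = PVState.SF := by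
        unfold pvTransition; cases hcg : get_char_category c <;> simp_all
      simp [pvLoopA, hstep, hd]
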